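-- pv_equiv track=rewrite | github.com/rtmnkt/vibecoding_skills-dev | skills/req-driven-dev/scripts/webui.py | _requirement_status
-- ===== SOURCE A (Python) =====
-- def _effective_status(row: dict) -> str:
--     if row.get("is_stale"):
--         return "stale"
--     v = row.get("v_status")
--     if v is None:
--         return "none"
--     if v in ("failed", "regression"):
--         return v
--     if row.get("a_decision") == "approved":
--         return "approved"
--     return "pending"
--
-- def _requirement_status(req_data: dict) -> str:
--     criteria = req_data["criteria"]
--     if not criteria:
--         return "none"
--     if any(c.get("is_stale") for c in criteria):
--         return "stale"
--     if any(c.get("v_status") == "regression" for c in criteria):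
--         return "regression"
--     if any(c.get("v_status") == "failed" for c in criteria):
--         return "failed"
--     if all(_effective_status(c) == "approved" for c in criteria):
--         return "approved"
--     return "pending"
-- ===== SOURCE B (Python) =====
-- def _requirement_status(req_data: dict) -> str:
--     criteria = req_data["criteria"]
--     if not criteria:
--         return "none"
--     # single pass: compute each criterion's effective status once, fold into flags
--     has_stale = has_regression = has_failed = False
--     all_approved = True
--     for c in criteria:
--         if c.get("is_stale"):
--             e = "stale"
--         else:
--             v = c.get("v_status")
--             if v is None:
--                 e = "none"
--             elif v in ("failed", "regression"):
--                 e = v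
--             elif c.get("a_decision") == "approved":
--                 e = "approved"
--             else:
--                 e = "pending"
--         has_stale = has_stale or e == "stale"
--         has_regression = has_regression or e == "regression"
--         has_failed = has_failed or e == "failed"
--         all_approved = all_approved and e == "approved"
--     if has_stale:
--         return "stale"
--     if has_regression:
--         return "regression"
--     if has_failed:
--         return "failed"
--     if all_approved:
--         return "approved"
--     return "pending"
-- ===== Notes on version B (the rewrite author's own statement) =====
-- stated objective: simpler
-- what changed: Replaces A's four separate any()/all() scans over criteria with a single pass that computes each criterion's effective status once and folds it into four flags, then resolves the priority ladder once from those flags.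
import Mathlib
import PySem

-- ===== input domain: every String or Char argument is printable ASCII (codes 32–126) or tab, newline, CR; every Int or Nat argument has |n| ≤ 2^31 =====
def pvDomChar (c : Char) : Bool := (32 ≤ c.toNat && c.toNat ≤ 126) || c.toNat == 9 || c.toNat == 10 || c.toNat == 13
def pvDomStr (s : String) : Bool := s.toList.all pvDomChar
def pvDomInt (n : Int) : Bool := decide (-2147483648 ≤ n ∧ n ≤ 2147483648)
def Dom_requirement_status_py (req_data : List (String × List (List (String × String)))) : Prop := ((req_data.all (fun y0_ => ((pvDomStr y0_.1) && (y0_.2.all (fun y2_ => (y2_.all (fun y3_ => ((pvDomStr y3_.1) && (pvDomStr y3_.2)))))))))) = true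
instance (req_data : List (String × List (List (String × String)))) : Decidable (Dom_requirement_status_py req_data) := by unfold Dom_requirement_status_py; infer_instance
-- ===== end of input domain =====

-- B folds each criterion's effective status into four flags in a single pass, then resolves the
-- priority ladder once, replacing A's four separate scans (objective: simpler decomposition).

-- ===== PORT A =====
-- Python truthiness of dict.get over string values: none/"" falsy, nonempty truthy
def pyTruthy (o : Option String) : Bool :=
  match o with
  | none => false
  | some s => !(s == "")

-- port of _effective_status (row.get = first-match association-list lookup)
def effStatus (row : List (String × String)) : String :=
  if pyTruthy (row.lookup "is_stale") then "stale"
  else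
    match row.lookup "v_status" with
    | none => "none"
    | some v =>
      if v == "failed" || v == "regression" then v
      else if row.lookup "a_decision" == some "approved" then "approved"
      else "pending"

def requirement_status_py (req_data : List (String × List (List (String × String)))) : String :=
  match req_data.lookup "criteria" with
  | none => "none"  -- Python raises KeyError here; excluded by Pre_
  | some criteria =>
    if criteria.isEmpty then "none"
    else if criteria.any (fun c => pyTruthy (c.lookup "is_stale")) then "stale"
    else if criteria.any (fun c => c.lookup "v_status" == some "regression") then "regression"
    else if criteria.any (fun c => c.lookup "v_status" == some "failed") then "failed"
    else if criteria.all (fun c => effStatus c == "approved") then "approved"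
    else "pending"

-- ===== PORT B =====
-- loop body of Source B: compute the effective status e inline, fold it into
-- (has_stale, has_regression, has_failed, all_approved)
def altStep (s : Bool × Bool × Bool × Bool) (c : List (String × String)) :
    Bool × Bool × Bool × Bool :=
  let e :=
    if pyTruthy (c.lookup "is_stale") then "stale"
    else
      match c.lookup "v_status" with
      | none => "none"
      | some v =>
        if v == "failed" || v == "regression" then v
        else if c.lookup "a_decision" == some "approved" then "approved"
        else "pending"
  (s.1 || e == "stale", s.2.1 || e == "regression", s.2.2.1 || e == "failed",
    s.2.2.2 && e == "approved")

def requirement_status_py_alt (req_data : List (String × List (List (String × String)))) : String :=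
  match req_data.lookup "criteria" with
  | none => "none"  -- Python raises KeyError here; excluded by Pre_
  | some criteria =>
    if criteria.isEmpty then "none"
    else
      let st := criteria.foldl altStep (false, false, false, true)
      if st.1 then "stale"
      else if st.2.1 then "regression"
      else if st.2.2.1 then "failed"
      else if st.2.2.2 then "approved"
      else "pending"

-- ===== PRECONDITION & SPEC =====
-- Pre_ excludes exactly the dicts without a "criteria" key, on which A raises KeyError.
def Pre_requirement_status_py (req_data : List (String × List (List (String × String)))) : Prop :=
  (req_data.lookup "criteria").isSome = true
instance (req_data : List (String × List (List (String × String)))) : Decidable (Pre_requirement_status_py req_data) := by unfold Pre_requirement_status_py; infer_instance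

def pvWitness_requirement_status_py : (List (String × List (List (String × String)))) :=
  [("criteria", [[("v_status", "passed"), ("a_decision", "approved")]])]

def Spec_requirement_status_py (req_data : List (String × List (List (String × String)))) (out : String) : Prop := out = requirement_status_py_alt req_data
instance (req_data : List (String × List (List (String × String)))) (out : String) : Decidable (Spec_requirement_status_py req_data out) := by unfold Spec_requirement_status_py; infer_instance

-- ===== CLAIM (what is proved, stated in full; the proofs are below) =====
def Claim_equal_requirement_status_py : Prop := ∀ (req_data : List (String × List (List (String × String)))), Dom_requirement_status_py req_data → Pre_requirement_status_py req_data → Spec_requirement_status_py req_data (requirement_status_py req_data)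

-- ===== LEMMAS AND PROOFS =====

-- the fold computes exactly the four scans
lemma altStep_foldl (l : List (List (String × String))) (a b c d : Bool) :
    l.foldl altStep (a, b, c, d) =
      (a || l.any (fun x => effStatus x == "stale"),
       b || l.any (fun x => effStatus x == "regression"),
       c || l.any (fun x => effStatus x == "failed"),
       d && l.all (fun x => effStatus x == "approved")) := by
  induction l generalizing a b c d with
  | nil => simp
  | cons h t ih =>
    simp only [List.foldl_cons, List.any_cons, List.all_cons]
    rw [show altStep (a, b, c, d) h =
        (a || (effStatus h == "stale"), b || (effStatus h == "regression"),
         c || (effStatus h == "failed"), d && (effStatus h == "approved")) from rfl]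
    rw [ih]
    simp [Bool.or_assoc, Bool.and_assoc]

lemma eff_stale (c : List (String × String)) :
    (effStatus c == "stale") = pyTruthy (c.lookup "is_stale") := by
  unfold effStatus
  rcases h : pyTruthy (c.lookup "is_stale") with _ | _
  · simp only [Bool.false_eq_true, if_false]
    rcases c.lookup "v_status" with _ | v
    · simp
    · by_cases hf : v = "failed"
      · subst hf; simp
      · by_cases hr : v = "regression"
        · subst hr; simp
        · split_ifs <;> simp_all
  · simp

lemma eff_reg (c : List (String × String)) (h : pyTruthy (c.lookup "is_stale") = false) :
    (effStatus c == "regression") = (c.lookup "v_status" == some "regression") := by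
  unfold effStatus
  rw [h]
  simp only [Bool.false_eq_true, if_false]
  rcases c.lookup "v_status" with _ | v
  · simp
  · by_cases hr : v = "regression"
    · subst hr; simp
    · by_cases hf : v = "failed"
      · subst hf; simp
      · split_ifs <;> simp_all

lemma eff_failed (c : List (String × String)) (h : pyTruthy (c.lookup "is_stale") = false) :
    (effStatus c == "failed") = (c.lookup "v_status" == some "failed") := by
  unfold effStatus
  rw [h]
  simp only [Bool.false_eq_true, if_false]
  rcases c.lookup "v_status" with _ | v
  · simp
  · by_cases hr : v = "regression"
    · subst hr; simp
    · by_cases hf : v = "failed"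
      · subst hf; simp
      · split_ifs <;> simp_all

lemma any_congr_mem {α : Type} (l : List α) (p q : α → Bool)
    (h : ∀ x ∈ l, p x = q x) : l.any p = l.any q := by
  induction l with
  | nil => rfl
  | cons a t ih => simp only [List.any_cons, h a (by simp), ih fun x hx => h x (by simp [hx])]

-- ===== VERDICT (by name: the statement is the Claim_ definition above) =====
theorem requirement_status_py_spec : Claim_equal_requirement_status_py := by
  intro req_data _ _
  unfold Spec_requirement_status_py requirement_status_py requirement_status_py_alt
  rcases req_data.lookup "criteria" with _ | criteria
  · rfl
  · simp only
    by_cases he : criteria.isEmpty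
    · simp [he]
    · simp only [he, altStep_foldl, Bool.false_or, Bool.true_and]
      rw [any_congr_mem criteria _ _ (fun x _ => eff_stale x)]
      by_cases hs : criteria.any (fun c => pyTruthy (c.lookup "is_stale"))
      · simp [hs]
      · have hs' : ∀ x ∈ criteria, pyTruthy (x.lookup "is_stale") = false := by
          intro x hx
          by_contra hc
          simp only [Bool.not_eq_false] at hc
          exact hs (List.any_eq_true.mpr ⟨x, hx, hc⟩)
        rw [any_congr_mem criteria _ _ (fun x hx => eff_reg x (hs' x hx)),
            any_congr_mem criteria _ _ (fun x hx => eff_failed x (hs' x hx))]
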